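-- pv_equiv track=rewrite | github.com/wondmD/A2SV | B_Following_the_String.py | construct_string
-- ===== SOURCE A (Python) =====
-- def construct_string(trace):
--     n = len(trace)
--     s = ['a'] * n
--     count = [0] * 26
--
--     for i in range(n):
--         s[i] = chr(count[trace[i]] + ord('a'))
--         count[trace[i]] += 1
--
--     return ''.join(s)
-- ===== SOURCE B (Python) =====
-- def construct_string(trace):
--     buckets = [[] for _ in range(26)]
--     for i, t in enumerate(trace):
--         buckets[t].append(i)
--     s = ['?'] * len(trace)
--     for bucket in buckets:
--         for rank, pos in enumerate(bucket):
--             s[pos] = chr(rank + ord('a'))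
--     return ''.join(s)
-- ===== Notes on version B (the rewrite author's own statement) =====
-- stated objective: alternative
-- what changed: Replaces the single running-count pass with a group-by decomposition: one pass buckets each position by its trace value into a 26-slot index table, then a second pass writes chr(rank+'a') into the output at each bucketed position by its rank within the bucket; Pre_ excludes traces with a value outside -26..25, on which both programs' indexing into a 26-slot list raises IndexError.
import Mathlib
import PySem

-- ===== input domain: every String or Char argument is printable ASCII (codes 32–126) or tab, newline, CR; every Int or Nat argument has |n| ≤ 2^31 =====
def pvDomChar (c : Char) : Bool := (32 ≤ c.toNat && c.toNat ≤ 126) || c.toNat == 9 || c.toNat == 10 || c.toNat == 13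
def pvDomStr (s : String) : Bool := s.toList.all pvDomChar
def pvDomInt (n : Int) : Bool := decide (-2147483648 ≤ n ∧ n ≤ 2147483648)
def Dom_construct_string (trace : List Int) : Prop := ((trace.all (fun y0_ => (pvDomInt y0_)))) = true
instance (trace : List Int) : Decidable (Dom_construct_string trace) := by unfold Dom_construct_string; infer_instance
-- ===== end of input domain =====

-- B replaces A's single running-count pass with a group-by decomposition: bucket each
-- position by its trace value into a 26-slot index table, then assign chr(rank+'a') per
-- bucket (alternative decomposition, same cost).


-- ===== PORT A =====
-- Python list index into a length-26 list: a negative index counts from the end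
-- (exact for -26 ≤ t ≤ 25, the indices on which Python does not raise).
def idx26 (t : Int) : Nat := if t < 0 then (t + 26).toNat else t.toNat

-- the `for i in range(n)` loop of A: s[i] is chr(count[trace[i]] + 97), then the slot is bumped
def csA_loop : List Int → List Int → List Char
  | [], _ => []
  | t :: rest, count =>
      let j := idx26 t
      let c := count.getD j 0
      Char.ofNat (c.toNat + 97) :: csA_loop rest (count.set j (c + 1))

def construct_string (trace : List Int) : String :=
  String.mk (csA_loop trace (List.replicate 26 ((0 : Int))))

-- ===== PORT B =====
-- Python list index into the length-26 buckets list (same Python primitive as in A's port)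
def idx26B (t : Int) : Nat := if t < 0 then (t + 26).toNat else t.toNat

-- `for i, t in enumerate(trace): buckets[t].append(i)`
def csB_fill : List Int → Nat → List (List Nat) → List (List Nat)
  | [], _, b => b
  | t :: rest, i, b =>
      let j := idx26B t
      csB_fill rest (i + 1) (b.set j (b.getD j [] ++ [i]))

-- `for rank, pos in enumerate(bucket): s[pos] = chr(rank + ord('a'))`
def csB_assign : List Char → Nat → List Nat → List Char
  | s, _, [] => s
  | s, r, p :: rest => csB_assign (s.set p (Char.ofNat (r + 97))) (r + 1) rest

def construct_string_alt (trace : List Int) : String :=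
  let buckets := csB_fill trace 0 (List.replicate 26 ([] : List Nat))
  String.mk (buckets.foldl (fun s b => csB_assign s 0 b) (List.replicate trace.length '?'))

-- ===== PRECONDITION & SPEC =====
-- Pre_ excludes exactly the traces with a value outside -26..25, on which both A's and
-- B's indexing into a 26-slot list raises IndexError (neither program returns there).
def Pre_construct_string (trace : List Int) : Prop := ∀ t ∈ trace, -26 ≤ t ∧ t ≤ 25
instance (trace : List Int) : Decidable (Pre_construct_string trace) := by unfold Pre_construct_string; infer_instance
def pvWitness_construct_string : List Int := [0, -1, 25, 0, -26]

def Spec_construct_string (trace : List Int) (out : String) : Prop := out = construct_string_alt trace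
instance (trace : List Int) (out : String) : Decidable (Spec_construct_string trace out) := by unfold Spec_construct_string; infer_instance

-- ===== CLAIM (what is proved, stated in full; the proofs are below) =====
def Claim_equal_construct_string : Prop := ∀ (trace : List Int), Dom_construct_string trace → Pre_construct_string trace → Spec_construct_string trace (construct_string trace)

-- ===== LEMMAS AND PROOFS =====

-- number of elements of l that hit slot j
def cntN (l : List Int) (j : Nat) : Nat := l.countP (fun u => idx26 u == j)

-- positions (offset by i0) of the elements of l that hit slot j, in order
def posL : List Int → Nat → Nat → List Nat
  | [], _, _ => []
  | t :: rest, i, j => (if idx26 t = j then [i] else []) ++ posL rest (i + 1) j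

lemma idx26_lt (t : Int) (h1 : -26 ≤ t) (h2 : t ≤ 25) : idx26 t < 26 := by
  unfold idx26; split <;> omega

lemma getD_set_eq (l : List Int) (j : Nat) (v : Int) (h : j < l.length) :
    (l.set j v).getD j 0 = v := by
  simp [List.getD_eq_getElem?_getD, h]

lemma getD_set_ne (l : List Int) (j j' : Nat) (v : Int) (h : j ≠ j') :
    (l.set j v).getD j' 0 = l.getD j' 0 := by
  simp [List.getD_eq_getElem?_getD, List.getElem?_set_ne h]

-- the invariant of A's loop: each produced character is the current slot value plus
-- the number of earlier loop elements hitting the same slot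
lemma csA_loop_eq (rest : List Int) : ∀ (count : List Int),
    count.length = 26 → (∀ j, 0 ≤ count.getD j 0) →
    (∀ t ∈ rest, -26 ≤ t ∧ t ≤ 25) →
    csA_loop rest count = (List.range rest.length).map (fun k =>
      Char.ofNat ((count.getD (idx26 (rest.getD k 0)) 0).toNat
        + cntN (rest.take k) (idx26 (rest.getD k 0)) + 97)) := by
  induction rest with
  | nil => intro count _ _ _; simp [csA_loop]
  | cons t rest ih =>
    intro count hlen hnn hb
    have hbt := hb t (by simp)
    have hj : idx26 t < 26 := idx26_lt t hbt.1 hbt.2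
    have ih' := ih (count.set (idx26 t) (count.getD (idx26 t) 0 + 1))
      (by simp [hlen])
      (by
        intro j
        by_cases h : idx26 t = j
        · subst h; rw [getD_set_eq _ _ _ (by omega)]; have := hnn (idx26 t); omega
        · rw [getD_set_ne _ _ _ _ h]; exact hnn j)
      (fun u hu => hb u (by simp [hu]))
    simp only [csA_loop, ih', List.length_cons, List.range_succ_eq_map,
      List.map_cons, List.map_map]
    congr 1
    apply List.map_congr_left
    intro k hk
    have hk' : k < rest.length := List.mem_range.mp hk
    simp only [Function.comp, Nat.succ_eq_add_one, cntN, List.countP_cons,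
      List.getD_cons_succ, List.take_succ_cons]
    by_cases h : idx26 t = idx26 (rest.getD k 0)
    · rw [← h, getD_set_eq _ _ _ (by omega)]
      have hc := hnn (idx26 t)
      simp only [beq_self_eq_true, if_true]
      congr 1
      omega
    · rw [getD_set_ne _ _ _ _ h]
      have hb' : (idx26 t == idx26 (rest.getD k 0)) = false := by simpa using h
      rw [hb']
      simp

lemma replicate_getD (j : Nat) : (List.replicate 26 ((0:Int))).getD j 0 = 0 := by
  rw [List.getD_eq_getElem?_getD, List.getElem?_replicate]
  split <;> simp

-- ---- B side ----

-- the two ports transliterate the same Python indexing primitive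
lemma idx26B_eq (t : Int) : idx26B t = idx26 t := rfl

lemma getD_set_eq' {a : Type} (l : List a) (j : Nat) (v d : a) (h : j < l.length) :
    (l.set j v).getD j d = v := by
  simp [List.getD_eq_getElem?_getD, h]

lemma getD_set_ne' {a : Type} (l : List a) (j j' : Nat) (v d : a) (h : j ≠ j') :
    (l.set j v).getD j' d = l.getD j' d := by
  simp [List.getD_eq_getElem?_getD, List.getElem?_set_ne h]

lemma getDL_set_eq (l : List (List Nat)) (j : Nat) (v : List Nat) (h : j < l.length) :
    (l.set j v).getD j [] = v := getD_set_eq' l j v [] h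

lemma getDL_set_ne (l : List (List Nat)) (j j' : Nat) (v : List Nat) (h : j ≠ j') :
    (l.set j v).getD j' [] = l.getD j' [] := getD_set_ne' l j j' v [] h

lemma csB_fill_length (rest : List Int) : ∀ i0 b, (csB_fill rest i0 b).length = b.length := by
  induction rest with
  | nil => intro _ _; rfl
  | cons t rest ih => intro i0 b; simp [csB_fill, ih]

-- the fill pass appends exactly the matching positions to each bucket
lemma csB_fill_getD (rest : List Int) : ∀ (i0 : Nat) (b : List (List Nat)),
    b.length = 26 → (∀ t ∈ rest, -26 ≤ t ∧ t ≤ 25) → ∀ j,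
    (csB_fill rest i0 b).getD j [] = b.getD j [] ++ posL rest i0 j := by
  induction rest with
  | nil => intro i0 b _ _ j; simp [csB_fill, posL]
  | cons t rest ih =>
    intro i0 b hlen hb j
    have hbt := hb t (by simp)
    have hj : idx26 t < 26 := idx26_lt t hbt.1 hbt.2
    have ih' := ih (i0 + 1) (b.set (idx26 t) (b.getD (idx26 t) [] ++ [i0]))
      (by simp [hlen]) (fun u hu => hb u (by simp [hu])) j
    simp only [csB_fill, idx26B_eq, ih', posL]
    by_cases h : idx26 t = j
    · subst h; rw [getDL_set_eq _ _ _ (by omega)]; simp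
    · rw [getDL_set_ne _ _ _ _ h]; simp [h]

lemma mem_posL {p : Nat} (rest : List Int) : ∀ i0 j, p ∈ posL rest i0 j →
    i0 ≤ p ∧ p - i0 < rest.length ∧ idx26 (rest.getD (p - i0) 0) = j := by
  induction rest with
  | nil => intro i0 j h; simp [posL] at h
  | cons t rest ih =>
    intro i0 j h
    simp only [posL, List.mem_append] at h
    rcases h with h | h
    · have hpt : idx26 t = j ∧ p = i0 := by
        by_cases ht : idx26 t = j
        · simp [ht] at h; exact ⟨ht, h⟩
        · simp [ht] at h
      obtain ⟨ht, rfl⟩ := hpt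
      exact ⟨le_refl _, by simp, by simp [ht]⟩
    · obtain ⟨h1, h2, h3⟩ := ih (i0 + 1) j h
      refine ⟨by omega, by simp; omega, ?_⟩
      have he : p - i0 = (p - (i0 + 1)) + 1 := by omega
      rw [he]
      simpa using h3

-- decomposition of a bucket at a matching position, with its rank
lemma posL_split {j : Nat} (rest : List Int) : ∀ (i0 k : Nat), k < rest.length →
    idx26 (rest.getD k 0) = j →
    ∃ pre post, posL rest i0 j = pre ++ (i0 + k) :: post ∧
      pre.length = cntN (rest.take k) j ∧
      (∀ q ∈ pre, q < i0 + k) ∧ (∀ q ∈ post, i0 + k < q) := by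
  induction rest with
  | nil => intro i0 k hk; simp at hk
  | cons t rest ih =>
    intro i0 k hk hj
    cases k with
    | zero =>
      simp only [List.getD_cons_zero] at hj
      refine ⟨[], posL rest (i0 + 1) j, by simp [posL, hj], by simp [cntN], by simp, ?_⟩
      intro q hq
      have := (mem_posL rest (i0 + 1) j hq).1
      omega
    | succ k =>
      simp only [List.getD_cons_succ] at hj
      obtain ⟨pre, post, heq, hlen, hpre, hpost⟩ := ih (i0 + 1) k (by simpa using hk) hj
      have harith : i0 + 1 + k = i0 + (k + 1) := by omega
      by_cases ht : idx26 t = j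
      · refine ⟨i0 :: pre, post, ?_, ?_, ?_, ?_⟩
        · simp only [posL, ht, if_pos]
          rw [heq, harith]
          simp
        · simp only [List.take_succ_cons, cntN, List.countP_cons, List.length_cons]
          simp [cntN] at hlen
          simp [ht, hlen]
        · intro q hq
          rcases List.mem_cons.mp hq with rfl | hq
          · omega
          · have := hpre q hq; omega
        · intro q hq; have := hpost q hq; omega
      · refine ⟨pre, post, ?_, ?_, ?_, ?_⟩
        · simp only [posL, ht, if_neg, not_false_iff]
          rw [heq, harith]
          simp
        · simp only [List.take_succ_cons, cntN, List.countP_cons, List.length_cons] at *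
          simp [ht, hlen]
        · intro q hq; have := hpre q hq; omega
        · intro q hq; have := hpost q hq; omega

lemma csB_assign_length (b : List Nat) : ∀ s r, (csB_assign s r b).length = s.length := by
  induction b with
  | nil => intro s r; rfl
  | cons p rest ih => intro s r; simp [csB_assign, ih]

lemma csB_assign_not_mem {p : Nat} (b : List Nat) : ∀ s r (d : Char), p ∉ b →
    (csB_assign s r b).getD p d = s.getD p d := by
  induction b with
  | nil => intro s r d _; rfl
  | cons q rest ih =>
    intro s r d hp
    simp only [List.mem_cons, not_or] at hp
    simp only [csB_assign, ih _ _ _ hp.2]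
    exact getD_set_ne' s q p _ d (fun h => hp.1 h.symm)

lemma csB_assign_hit {p : Nat} (pre : List Nat) : ∀ (post : List Nat) s r (d : Char),
    p ∉ pre → p ∉ post → p < s.length →
    (csB_assign s r (pre ++ p :: post)).getD p d = Char.ofNat (r + pre.length + 97) := by
  induction pre with
  | nil =>
    intro post s r d _ hpost hlen
    simp only [List.nil_append, csB_assign, List.length_nil]
    rw [csB_assign_not_mem _ _ _ _ hpost, getD_set_eq' _ _ _ _ hlen]
  | cons q pre ih =>
    intro post s r d hpre hpost hlen
    simp only [List.mem_cons, not_or] at hpre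
    simp only [List.cons_append, csB_assign, List.length_cons]
    rw [ih post _ (r + 1) d hpre.2 hpost (by simpa using hlen)]
    congr 1
    omega

lemma foldl_assign_length (bs : List (List Nat)) : ∀ s,
    (bs.foldl (fun s b => csB_assign s 0 b) s).length = s.length := by
  induction bs with
  | nil => intro s; rfl
  | cons b bs ih => intro s; simp [ih, csB_assign_length]

lemma foldl_assign_not_mem {p : Nat} (bs : List (List Nat)) : ∀ s (d : Char),
    (∀ b ∈ bs, p ∉ b) → (bs.foldl (fun s b => csB_assign s 0 b) s).getD p d = s.getD p d := by
  induction bs with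
  | nil => intro s d _; rfl
  | cons b bs ih =>
    intro s d h
    simp only [List.foldl_cons]
    rw [ih _ _ (fun b' hb' => h b' (by simp [hb'])), csB_assign_not_mem _ _ _ _ (h b (by simp))]

-- the B-side result, characterised per position
lemma csB_result_getD (trace : List Int) (hb : ∀ t ∈ trace, -26 ≤ t ∧ t ≤ 25)
    (p : Nat) (hp : p < trace.length) :
    ((csB_fill trace 0 (List.replicate 26 ([] : List Nat))).foldl
        (fun s b => csB_assign s 0 b) (List.replicate trace.length '?')).getD p '?'
      = Char.ofNat (cntN (trace.take p) (idx26 (trace.getD p 0)) + 97) := by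
  set B := csB_fill trace 0 (List.replicate 26 ([] : List Nat)) with hB
  have hBlen : B.length = 26 := by rw [hB, csB_fill_length]; simp
  have hBget : ∀ j, B.getD j [] = posL trace 0 j := by
    intro j
    rw [hB, csB_fill_getD trace 0 _ (by simp) hb j]
    rw [List.getD_eq_getElem?_getD, List.getElem?_replicate]
    split <;> simp
  set jp := idx26 (trace.getD p 0) with hjp
  have hjlt : jp < 26 := by
    have hm : trace.getD p 0 ∈ trace := by
      rw [List.getD_eq_getElem _ _ hp]; exact List.getElem_mem hp
    exact idx26_lt _ (hb _ hm).1 (hb _ hm).2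
  -- p lies only in bucket jp
  have hnotin : ∀ j, j < 26 → j ≠ jp → p ∉ posL trace 0 j := by
    intro j _ hne hmem
    have := (mem_posL trace 0 j hmem).2.2
    simp only [Nat.sub_zero] at this
    exact hne (by rw [← this, hjp])
  -- split B at index jp
  have hsplit : B = B.take jp ++ B[jp] :: B.drop (jp + 1) := by
    conv_lhs => rw [← List.take_append_drop jp B]
    congr 1
    exact List.drop_eq_getElem_cons (l := B) (i := jp) (by omega)
  have hBjp : B[jp] = posL trace 0 jp := by
    rw [← List.getD_eq_getElem B [] (by omega)]; exact hBget jp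
  obtain ⟨pre, post, hdec, hlen, hpre, hpost⟩ :=
    posL_split (j := jp) trace 0 p hp (by rw [hjp])
  simp only [Nat.zero_add] at hdec hpre hpost
  have hnotpre : p ∉ pre := fun h => by have := hpre p h; omega
  have hnotpost : p ∉ post := fun h => by have := hpost p h; omega
  rw [hsplit, List.foldl_append, List.foldl_cons]
  rw [foldl_assign_not_mem _ _ _ ?hdropside]
  case hdropside =>
    intro b hbm
    obtain ⟨i, hilt, hbeq⟩ := List.mem_iff_getElem.mp hbm
    have hdl : (B.drop (jp + 1)).length = 26 - (jp + 1) := by simp [hBlen]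
    have hgd : (B.drop (jp + 1))[i] = B[jp + 1 + i]'(by omega) := by
      simp [List.getElem_drop]
    rw [← hbeq, hgd, ← List.getD_eq_getElem B [] (by rw [hBlen]; omega), hBget]
    exact hnotin _ (by rw [hdl] at hilt; omega) (by omega)
  rw [hBjp, hdec, csB_assign_hit pre post _ 0 '?' hnotpre hnotpost ?hplen]
  case hplen =>
    rw [foldl_assign_length]
    simpa using hp
  rw [hlen]
  norm_num

-- ===== VERDICT (by name: the statement is the Claim_ definition above) =====
theorem construct_string_spec : Claim_equal_construct_string := by
  intro trace _ hpre
  unfold Spec_construct_string construct_string construct_string_alt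
  rw [csA_loop_eq trace (List.replicate 26 0) (by simp) (fun j => by rw [replicate_getD]) hpre]
  congr 1
  have hBlen : ((csB_fill trace 0 (List.replicate 26 ([] : List Nat))).foldl
      (fun s b => csB_assign s 0 b) (List.replicate trace.length '?')).length = trace.length := by
    rw [foldl_assign_length]; simp
  apply List.ext_getElem
  · simp only [List.length_map, List.length_range]
    exact hBlen.symm
  · intro k h1 h2
    have hk : k < trace.length := by simpa using h1
    rw [List.getElem_map, List.getElem_range]
    rw [← List.getD_eq_getElem _ '?' h2, csB_result_getD trace hpre k hk]
    rw [replicate_getD]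
    norm_num
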